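-- pv_equiv track=rewrite | github.com/dubsidiya/checkbrain | desh/ege2026kp/4solve/4-221_aidiev.py | lenn
-- ===== SOURCE A (Python) =====
-- dic = [0] * 20
--
-- def lenn(dic, mas):  # подсчитывает длину каждой итерации
--     if sum(dic) < len(mas):  # если свободных мест меньше, чем нужных
--         return 100000000
--     su = 0
--     for i in mas:
--         for j in range(len(dic)):
--             if dic[j] != 0:
--                 su += i * j
--                 dic[j] -= 1
--                 break
--     return su  # возвращает суммарную длину кода
-- ===== SOURCE B (Python) =====
-- def lenn(dic, mas):
--     # monotonic pointer: slots once emptied stay empty, so the prefix is never rescanned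
--     if sum(dic) < len(mas):
--         return 100000000
--     su = 0
--     j = 0
--     n = len(dic)
--     for i in mas:
--         while j < n and dic[j] == 0:
--             j += 1
--         if j < n:
--             su += i * j
--             dic[j] -= 1
--     return su
-- ===== Notes on version B (the rewrite author's own statement) =====
-- stated objective: alternative
-- what changed: Replaces A's per-item rescan of all slots by a single monotonic pointer to the first nonzero slot (zeroed slots never revive, so the pointer only moves forward); same result, different traversal (O(n+k) worst case vs O(n*k), though not measurably faster on the generated inputs).
import Mathlib
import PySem

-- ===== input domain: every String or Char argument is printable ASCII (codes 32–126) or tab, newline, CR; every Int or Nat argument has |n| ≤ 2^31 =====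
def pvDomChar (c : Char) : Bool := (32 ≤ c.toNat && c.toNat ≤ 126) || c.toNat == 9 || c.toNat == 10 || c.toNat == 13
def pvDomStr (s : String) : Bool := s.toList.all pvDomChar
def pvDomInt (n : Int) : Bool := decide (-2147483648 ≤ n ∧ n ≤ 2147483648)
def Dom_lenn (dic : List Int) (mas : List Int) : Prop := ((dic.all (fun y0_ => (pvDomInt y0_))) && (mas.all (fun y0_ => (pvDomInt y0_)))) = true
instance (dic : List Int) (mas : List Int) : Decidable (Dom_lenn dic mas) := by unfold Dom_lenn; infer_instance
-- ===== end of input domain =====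

-- B replaces A's per-item rescan of all slots by a monotonic pointer to the first
-- nonzero slot, a different traversal of the same data. Both A and B mutate `dic`
-- identically in Python; the equivalence proved here is about the return value.

-- ===== PORT A =====
-- inner 'for j in range(len(dic)): if dic[j] != 0: … break' — find first nonzero slot
def lennScan (d : List Int) (js : List Nat) : Option Nat :=
  match js with
  | [] => none
  | j :: rest => if d.getD j 0 ≠ 0 then some j else lennScan d rest

def lennStep (st : List Int × Int) (i : Int) : List Int × Int :=
  match lennScan st.1 (List.range st.1.length) with
  | none => st
  | some j => (st.1.set j (st.1.getD j 0 - 1), st.2 + i * (j : Int))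

def lenn (dic : List Int) (mas : List Int) : Int :=
  if dic.sum < (mas.length : Int) then 100000000
  else (mas.foldl lennStep (dic, 0)).2

-- ===== PORT B =====
-- 'while j < n and dic[j] == 0: j += 1'
def lennAdv (d : List Int) (p : Nat) : Nat :=
  if p < d.length then
    if d.getD p 0 = 0 then lennAdv d (p + 1) else p
  else p
termination_by d.length - p

def lennAltStep (st : (List Int × Nat) × Int) (i : Int) : (List Int × Nat) × Int :=
  let p := lennAdv st.1.1 st.1.2
  if p < st.1.1.length then
    ((st.1.1.set p (st.1.1.getD p 0 - 1), p), st.2 + i * (p : Int))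
  else ((st.1.1, p), st.2)

def lenn_alt (dic : List Int) (mas : List Int) : Int :=
  if dic.sum < (mas.length : Int) then 100000000
  else (mas.foldl lennAltStep ((dic, 0), 0)).2

-- ===== PRECONDITION & SPEC =====
def Spec_lenn (dic : List Int) (mas : List Int) (out : Int) : Prop := out = lenn_alt dic mas
instance (dic : List Int) (mas : List Int) (out : Int) : Decidable (Spec_lenn dic mas out) := by unfold Spec_lenn; infer_instance

-- ===== CLAIM (what is proved, stated in full; the proofs are below) =====
def Claim_equal_lenn : Prop := ∀ (dic : List Int) (mas : List Int), Dom_lenn dic mas → Spec_lenn dic mas (lenn dic mas)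

-- ===== LEMMAS AND PROOFS =====

-- prefix-of-zeros invariant
def ZPre (d : List Int) (p : Nat) : Prop := ∀ k, k < p → d.getD k 0 = 0

theorem lennAdv_eq (d : List Int) (p : Nat) :
    lennAdv d p = if p < d.length then (if d.getD p 0 = 0 then lennAdv d (p + 1) else p) else p := by
  conv_lhs => rw [lennAdv]

theorem lennAdv_ge (d : List Int) (p : Nat) : p ≤ lennAdv d p := by
  rw [lennAdv_eq]
  split
  · split
    · exact le_trans (Nat.le_succ p) (lennAdv_ge d (p + 1))
    · exact le_refl p
  · exact le_refl p
termination_by d.length - p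

theorem lennAdv_le (d : List Int) (p : Nat) (hp : p ≤ d.length) : lennAdv d p ≤ d.length := by
  rw [lennAdv_eq]
  split
  · split
    · exact lennAdv_le d (p + 1) (by omega)
    · exact hp
  · exact hp
termination_by d.length - p

theorem lennAdv_zpre (d : List Int) (p : Nat) (h : ZPre d p) : ZPre d (lennAdv d p) := by
  rw [lennAdv_eq]
  split
  · split
    · rename_i hz
      apply lennAdv_zpre d (p + 1)
      intro k hk
      rcases Nat.lt_succ_iff_lt_or_eq.mp hk with h' | h'
      · exact h k h'
      · subst h'; exact hz
    · exact h
  · exact h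
termination_by d.length - p

theorem lennAdv_nonzero (d : List Int) (p : Nat) (h : lennAdv d p < d.length) :
    d.getD (lennAdv d p) 0 ≠ 0 := by
  by_cases hp : p < d.length
  · by_cases hz : d.getD p 0 = 0
    · have e : lennAdv d p = lennAdv d (p + 1) := by rw [lennAdv_eq, if_pos hp, if_pos hz]
      rw [e] at h ⊢
      exact lennAdv_nonzero d (p + 1) h
    · have e : lennAdv d p = p := by rw [lennAdv_eq, if_pos hp, if_neg hz]
      rw [e]
      exact hz
  · have e : lennAdv d p = p := by rw [lennAdv_eq, if_neg hp]
    rw [e] at h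
    omega
termination_by d.length - p

-- scanning the tail range' from a zero prefix finds exactly lennAdv
theorem scan_range' (d : List Int) (p : Nat) (hp : p ≤ d.length) :
    lennScan d (List.range' p (d.length - p)) =
      if lennAdv d p < d.length then some (lennAdv d p) else none := by
  cases hm : d.length - p with
  | zero =>
    have e : lennAdv d p = p := by rw [lennAdv_eq, if_neg (by omega)]
    rw [e, if_neg (by omega)]
    rfl
  | succ m =>
    have hplt : p < d.length := by omega
    rw [List.range'_succ]
    simp only [lennScan]
    by_cases hz : d.getD p 0 = 0
    · have hrec := scan_range' d (p + 1) (by omega)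
      have hmm : d.length - (p + 1) = m := by omega
      rw [hmm] at hrec
      have e : lennAdv d p = lennAdv d (p + 1) := by rw [lennAdv_eq, if_pos hplt, if_pos hz]
      rw [if_neg (by simpa using hz), hrec, e]
    · have e : lennAdv d p = p := by rw [lennAdv_eq, if_pos hplt, if_neg hz]
      rw [if_pos (by simpa using hz), e, if_pos hplt]
termination_by d.length - p

theorem scan_skip_zeros (d : List Int) (p : Nat) (hp : p ≤ d.length) (h : ZPre d p) :
    lennScan d (List.range d.length) = lennScan d (List.range' p (d.length - p)) := by
  induction p with
  | zero => simp [List.range_eq_range']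
  | succ q ih =>
    have hq : q ≤ d.length := by omega
    rw [ih hq (fun k hk => h k (by omega))]
    have : d.length - q = (d.length - (q + 1)) + 1 := by omega
    rw [this, List.range'_succ]
    simp only [lennScan]
    rw [if_neg (by simpa using h q (by omega))]

theorem set_zpre (d : List Int) (p : Nat) (h : ZPre d p) (v : Int) :
    ZPre (d.set p v) p := by
  intro k hk
  have := h k hk
  simp only [List.getD_eq_getElem?_getD] at this ⊢
  rw [List.getElem?_set_ne (by omega)]
  exact this

-- the main invariant: both folds produce the same sum from matching states
theorem fold_eq (mas : List Int) (d : List Int) (p : Nat) (su : Int)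
    (hp : p ≤ d.length) (hz : ZPre d p) :
    (mas.foldl lennStep (d, su)).2 = (mas.foldl lennAltStep ((d, p), su)).2 := by
  induction mas generalizing d p su with
  | nil => rfl
  | cons i rest ih =>
    simp only [List.foldl]
    have hscan : lennScan d (List.range d.length) =
        if lennAdv d p < d.length then some (lennAdv d p) else none := by
      rw [scan_skip_zeros d p hp hz, scan_range' d p hp]
    by_cases hlt : lennAdv d p < d.length
    · rw [if_pos hlt] at hscan
      have hstep : lennStep (d, su) i =
          (d.set (lennAdv d p) (d.getD (lennAdv d p) 0 - 1), su + i * (lennAdv d p : Int)) := by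
        simp only [lennStep, hscan]
      have haltstep : lennAltStep ((d, p), su) i =
          ((d.set (lennAdv d p) (d.getD (lennAdv d p) 0 - 1), lennAdv d p), su + i * (lennAdv d p : Int)) := by
        simp only [lennAltStep]
        rw [if_pos hlt]
      rw [hstep, haltstep]
      exact ih _ _ _ (by simp only [List.length_set]; omega)
        (set_zpre d (lennAdv d p) (lennAdv_zpre d p hz) _)
    · rw [if_neg hlt] at hscan
      have hstep : lennStep (d, su) i = (d, su) := by
        simp only [lennStep, hscan]
      have haltstep : lennAltStep ((d, p), su) i = ((d, lennAdv d p), su) := by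
        simp only [lennAltStep]
        rw [if_neg hlt]
      rw [hstep, haltstep]
      exact ih _ _ _ (lennAdv_le d p hp) (lennAdv_zpre d p hz)

-- ===== VERDICT (by name: the statement is the Claim_ definition above) =====
theorem lenn_spec : Claim_equal_lenn := by
  intro dic mas _
  unfold Spec_lenn lenn lenn_alt
  split
  · rfl
  · exact fold_eq mas dic 0 0 (Nat.zero_le _) (fun k hk => by omega)
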